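-- pv_equiv track=rewrite | github.com/mw197hub/codingame | easy/Annihilation/main.py | bewegen
-- ===== SOURCE A (Python) =====
-- def move(l,lineList,h,w,ih,iw,moveDict):
--     m=[]
--     if lineList[ih][iw] == ">":
--         m = [0,1]
--     if lineList[ih][iw] == "<":
--         m = [0,-1]
--     if lineList[ih][iw] == "v":
--         m = [1,0]
--     if lineList[ih][iw] == "^":
--         m = [-1,0]
--
--     nh = ih + m[0];nw = iw + m[1]
--     if nh >= h:
--         nh = 0
--     if nh < 0:
--         nh = h-1
--     if nw >= w:
--         nw = 0
--     if nw < 0: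
--         nw = w -1
--     if str(nh)+"-"+str(nw) in moveDict:
--         moveDict[str(nh)+"-"+str(nw)] = "x"
--     else:
--         moveDict[str(nh)+"-"+str(nw)] = lineList[ih][iw]
--
--     lineList[ih][iw] = "."
--
-- def bewegen(lineList,h,w):
--     moveDict={}
--     for ih in range(h):
--         line = lineList[ih]
--         for iw in range(w):
--             l = line[iw]
--             if l in "><v^":
--                 move(l,lineList,h,w,ih,iw,moveDict)
--     anzahl = 0
--
--     for m,feld in moveDict.items():
--         m1,m2=m.split("-")
--         if not feld == "x":
--             lineList[int(m1)][int(m2)] = feld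
--             anzahl +=1
--     return anzahl
-- ===== SOURCE B (Python) =====
-- def bewegen(lineList, h, w):
--     # Destination-centric: a cell gets a surviving arrow iff exactly one of its
--     # four wrapped neighbours points into it; no move list or collision map needed.
--     anzahl = 0
--     for r in range(h):
--         for c in range(w):
--             incoming = 0
--             if lineList[r][(c - 1) % w] == ">":
--                 incoming += 1
--             if lineList[r][(c + 1) % w] == "<":
--                 incoming += 1
--             if lineList[(r - 1) % h][c] == "v":
--                 incoming += 1
--             if lineList[(r + 1) % h][c] == "^":
--                 incoming += 1
--             if incoming == 1:
--                 anzahl += 1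
--     return anzahl
-- ===== Notes on version B (the rewrite author's own statement) =====
-- stated objective: alternative
-- what changed: B is destination-centric: instead of A's source scan that builds a string-keyed collision dict with 'x' sentinels and then counts its non-'x' entries, B never builds any move list or map at all - for each grid cell it counts how many of its four wrapped neighbours point into it and counts the cells whose incoming count is exactly one.
import Mathlib
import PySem

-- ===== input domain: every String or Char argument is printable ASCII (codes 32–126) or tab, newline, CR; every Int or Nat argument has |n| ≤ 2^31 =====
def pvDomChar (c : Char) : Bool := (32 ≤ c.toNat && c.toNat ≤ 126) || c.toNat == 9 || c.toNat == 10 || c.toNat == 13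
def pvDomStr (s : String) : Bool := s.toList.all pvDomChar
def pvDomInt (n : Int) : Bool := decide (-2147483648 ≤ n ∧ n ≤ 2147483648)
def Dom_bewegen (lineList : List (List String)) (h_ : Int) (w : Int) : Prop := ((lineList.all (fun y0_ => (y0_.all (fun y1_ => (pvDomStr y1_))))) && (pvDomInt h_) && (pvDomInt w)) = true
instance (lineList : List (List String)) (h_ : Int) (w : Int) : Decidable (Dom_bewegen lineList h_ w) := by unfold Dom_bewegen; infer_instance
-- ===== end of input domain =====

set_option maxRecDepth 16384


-- B is destination-centric: it never builds a move list or collision map — a cell survives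
-- iff exactly one of its four wrapped neighbours points into it.
-- Both ports model the RETURN value only: Python A mutates lineList in place
-- (clears sources, writes survivors); Python B does not mutate its argument.

-- ===== PORT A =====
-- Python dict keys str(nh)+"-"+str(nw); strings are kept as List Char (the PySem representation)
def pvKey (nh nw : Int) : List Char := PySem.Int.toChars nh ++ '-' :: PySem.Int.toChars nw

def moveA (lineList : List (List String)) (h_ w ih iw : Int)
    (moveDict : PySem.Dict (List Char) String) : PySem.Dict (List Char) String :=
  let cell := PySem.List.pyGetD (PySem.List.pyGetD lineList ih []) iw ""
  -- Python sets m=[] and overwrites it per arrow; m[0] on a non-arrow cell raises IndexError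
  -- (those inputs are outside Pre_bewegen); the port uses (0,0) there
  let m : Int × Int :=
    if cell = ">" then (0, 1)
    else if cell = "<" then (0, -1)
    else if cell = "v" then (1, 0)
    else if cell = "^" then (-1, 0)
    else (0, 0)
  let nh0 := ih + m.1
  let nh1 := if nh0 ≥ h_ then 0 else nh0
  let nh := if nh1 < 0 then h_ - 1 else nh1
  let nw0 := iw + m.2
  let nw1 := if nw0 ≥ w then 0 else nw0
  let nw := if nw1 < 0 then w - 1 else nw1
  if moveDict.contains (pvKey nh nw) then moveDict.insert (pvKey nh nw) "x"
  else moveDict.insert (pvKey nh nw) cell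

def bewegen (lineList : List (List String)) (h_ : Int) (w : Int) : Int :=
  let moveDict := (PySem.List.pyRange 0 h_).foldl (fun md ih =>
    let line := PySem.List.pyGetD lineList ih []
    (PySem.List.pyRange 0 w).foldl (fun md iw =>
      let l := PySem.List.pyGetD line iw ""
      if PySem.Str.isIn l "><v^" then moveA lineList h_ w ih iw md else md) md)
    PySem.Dict.empty
  -- the second loop's grid writes are in-place mutation of the argument; the returned count is ported
  moveDict.items.foldl (fun anzahl mf => if ¬ (mf.2 = "x") then anzahl + 1 else anzahl) 0

-- ===== PORT B =====
def bewegen_alt (lineList : List (List String)) (h_ : Int) (w : Int) : Int :=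
  (PySem.List.pyRange 0 h_).foldl (fun anzahl r =>
    (PySem.List.pyRange 0 w).foldl (fun anzahl c =>
      let incoming : Int := 0
      let incoming := if PySem.List.pyGetD (PySem.List.pyGetD lineList r []) (PySem.Int.mod (c - 1) w) "" = ">" then incoming + 1 else incoming
      let incoming := if PySem.List.pyGetD (PySem.List.pyGetD lineList r []) (PySem.Int.mod (c + 1) w) "" = "<" then incoming + 1 else incoming
      let incoming := if PySem.List.pyGetD (PySem.List.pyGetD lineList (PySem.Int.mod (r - 1) h_) []) c "" = "v" then incoming + 1 else incoming
      let incoming := if PySem.List.pyGetD (PySem.List.pyGetD lineList (PySem.Int.mod (r + 1) h_) []) c "" = "^" then incoming + 1 else incoming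
      if incoming = 1 then anzahl + 1 else anzahl) anzahl) 0

-- ===== PRECONDITION & SPEC =====
-- the strings that are substrings of "><v^" without being one of the four arrows: on such a
-- cell Python A executes m[0] with m == [] and raises IndexError
def badCells : List String := ["", "><", "<v", "v^", "><v", "<v^", "><v^"]

-- exactly the inputs on which Python A returns: the first h_ rows exist, each is at least w wide,
-- and no scanned cell is a proper substring of "><v^" (A raises IndexError otherwise)
def Pre_bewegen (lineList : List (List String)) (h_ : Int) (w : Int) : Prop :=
  h_ ≤ lineList.length ∧
  ∀ row ∈ lineList.take h_.toNat, w ≤ row.length ∧ ∀ c ∈ row.take w.toNat, c ∉ badCells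

instance (lineList : List (List String)) (h_ : Int) (w : Int) : Decidable (Pre_bewegen lineList h_ w) := by
  unfold Pre_bewegen; infer_instance

def pvWitness_bewegen : List (List String) × Int × Int := ([[">", "."], [".", "v"]], 2, 2)

def Spec_bewegen (lineList : List (List String)) (h_ : Int) (w : Int) (out : Int) : Prop := out = bewegen_alt lineList h_ w
instance (lineList : List (List String)) (h_ : Int) (w : Int) (out : Int) : Decidable (Spec_bewegen lineList h_ w out) := by unfold Spec_bewegen; infer_instance

-- ===== CLAIM (what is proved, stated in full; the proofs are below) =====
def Claim_equal_bewegen : Prop := ∀ (lineList : List (List String)) (h_ : Int) (w : Int), Dom_bewegen lineList h_ w → Pre_bewegen lineList h_ w → Spec_bewegen lineList h_ w (bewegen lineList h_ w)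

-- ===== LEMMAS AND PROOFS =====

-- ---- str(n) for n ≥ 0: digits only, injective ----

theorem pv_tdc_append (b : ℕ) (f : ℕ) : ∀ (n : ℕ) (ds : List Char),
    Nat.toDigitsCore b f n ds = Nat.toDigitsCore b f n [] ++ ds := by
  induction f with
  | zero => intro n ds; simp [Nat.toDigitsCore]
  | succ f ih =>
    intro n ds
    simp only [Nat.toDigitsCore]
    by_cases h : n / b = 0
    · simp [h]
    · simp only [h, if_false]
      rw [ih (n / b) ((n % b).digitChar :: ds), ih (n / b) [(n % b).digitChar]]
      simp

theorem pv_tdc_fuel : ∀ (n f₁ f₂ : ℕ), n < 10 ^ f₁ → n < 10 ^ f₂ → 0 < f₁ → 0 < f₂ →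
    Nat.toDigitsCore 10 f₁ n [] = Nat.toDigitsCore 10 f₂ n [] := by
  intro n
  induction n using Nat.strong_induction_on with
  | _ n ih =>
    intro f₁ f₂ h1 h2 hp1 hp2
    obtain ⟨g₁, rfl⟩ := Nat.exists_eq_succ_of_ne_zero (Nat.pos_iff_ne_zero.mp hp1)
    obtain ⟨g₂, rfl⟩ := Nat.exists_eq_succ_of_ne_zero (Nat.pos_iff_ne_zero.mp hp2)
    simp only [Nat.toDigitsCore]
    by_cases h : n / 10 = 0
    · simp [h]
    · simp only [h, if_false]
      rw [pv_tdc_append 10 g₁, pv_tdc_append 10 g₂]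
      have hn10 : 10 ≤ n := by
        by_contra hlt
        exact h (Nat.div_eq_of_lt (by omega))
      have hg1 : 0 < g₁ := by
        rcases Nat.eq_zero_or_pos g₁ with h0 | h0
        · subst h0; simp at h1; omega
        · exact h0
      have hg2 : 0 < g₂ := by
        rcases Nat.eq_zero_or_pos g₂ with h0 | h0
        · subst h0; simp at h2; omega
        · exact h0
      have hb1 : n / 10 < 10 ^ g₁ := Nat.div_lt_of_lt_mul (by rw [pow_succ] at h1; omega)
      have hb2 : n / 10 < 10 ^ g₂ := Nat.div_lt_of_lt_mul (by rw [pow_succ] at h2; omega)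
      rw [ih (n / 10) (by omega) g₁ g₂ hb1 hb2 hg1 hg2]

def pvDigits (n : ℕ) : List Char := Nat.toDigits 10 n

theorem pvDigits_lt {n : ℕ} (h : n < 10) : pvDigits n = [Nat.digitChar n] := by
  simp only [pvDigits, Nat.toDigits, Nat.toDigitsCore]
  have : n / 10 = 0 := Nat.div_eq_of_lt h
  simp [this, Nat.mod_eq_of_lt h]

theorem pvDigits_ge {n : ℕ} (h : 10 ≤ n) :
    pvDigits n = pvDigits (n / 10) ++ [Nat.digitChar (n % 10)] := by
  simp only [pvDigits, Nat.toDigits, Nat.toDigitsCore]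
  have h10 : n / 10 ≠ 0 := by
    have := Nat.div_le_div_right (c := 10) h
    simp at this; omega
  simp only [h10, if_false]
  rw [pv_tdc_append 10 n]
  congr 1
  exact pv_tdc_fuel (n / 10) n (n / 10 + 1)
    (lt_of_le_of_lt (Nat.div_le_self n 10) (Nat.lt_pow_self (a := 10) (by norm_num)))
    (lt_of_lt_of_le (Nat.lt_pow_self (a := 10) (by norm_num)) (Nat.pow_le_pow_right (by norm_num) (by omega))) (by omega) (by omega)

theorem pvDigits_ne_nil (n : ℕ) : pvDigits n ≠ [] := by
  rcases lt_or_ge n 10 with h | h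
  · simp [pvDigits_lt h]
  · simp [pvDigits_ge h]

theorem pv_digitChar_ne_dash {m : ℕ} (h : m < 10) : Nat.digitChar m ≠ '-' := by
  interval_cases m <;> decide

theorem pv_dash_not_mem_pvDigits (n : ℕ) : '-' ∉ pvDigits n := by
  induction n using Nat.strong_induction_on with
  | _ n ih =>
    rcases lt_or_ge n 10 with h | h
    · rw [pvDigits_lt h]
      intro hc
      exact pv_digitChar_ne_dash h (List.mem_singleton.mp hc).symm
    · rw [pvDigits_ge h]
      have h1 : '-' ∉ pvDigits (n / 10) := ih (n / 10) (by omega)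
      have h2 : Nat.digitChar (n % 10) ≠ '-' := pv_digitChar_ne_dash (Nat.mod_lt n (by omega))
      intro hc
      rcases List.mem_append.mp hc with hc1 | hc2
      · exact h1 hc1
      · exact h2 (List.mem_singleton.mp hc2).symm

theorem pv_digitChar_inj {a b : ℕ} (ha : a < 10) (hb : b < 10)
    (h : Nat.digitChar a = Nat.digitChar b) : a = b := by
  interval_cases a <;> interval_cases b <;> revert h <;> decide

theorem pvDigits_inj : ∀ (a b : ℕ), pvDigits a = pvDigits b → a = b := by
  intro a
  induction a using Nat.strong_induction_on with
  | _ a ih =>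
    intro b h
    rcases lt_or_ge a 10 with ha | ha <;> rcases lt_or_ge b 10 with hb | hb
    · rw [pvDigits_lt ha, pvDigits_lt hb] at h
      exact pv_digitChar_inj ha hb (by simpa using h)
    · rw [pvDigits_lt ha, pvDigits_ge hb] at h
      have := congrArg List.length h
      simp at this
      exact absurd this (pvDigits_ne_nil _)
    · rw [pvDigits_ge ha, pvDigits_lt hb] at h
      have := congrArg List.length h
      simp at this
      exact absurd this (pvDigits_ne_nil _)
    · rw [pvDigits_ge ha, pvDigits_ge hb] at h
      have h2 := List.append_inj h (by
        have := congrArg List.length h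
        simpa using this)
      obtain ⟨hpre, hsuf⟩ := h2
      have hmod : a % 10 = b % 10 :=
        pv_digitChar_inj (Nat.mod_lt _ (by omega)) (Nat.mod_lt _ (by omega)) (by simpa using hsuf)
      have hdiv : a / 10 = b / 10 := ih (a / 10) (by omega) (b / 10) hpre
      omega

theorem pv_toChars_nonneg {n : Int} (h : 0 ≤ n) : PySem.Int.toChars n = pvDigits n.toNat := by
  simp [PySem.Int.toChars, pvDigits, not_lt.mpr h]

theorem pv_split_dash {xs ys us vs : List Char} (hx : '-' ∉ xs) (hu : '-' ∉ us)
    (h : xs ++ '-' :: ys = us ++ '-' :: vs) : xs = us ∧ ys = vs := by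
  induction xs generalizing us with
  | nil =>
    cases us with
    | nil => simpa using h
    | cons u us' =>
      simp at h
      obtain ⟨h1, -⟩ := h
      subst h1
      exact absurd (by simp : '-' ∈ '-' :: us') hu
  | cons x xs' ihx =>
    cases us with
    | nil =>
      simp at h
      obtain ⟨h1, -⟩ := h
      subst h1
      exact absurd (by simp : '-' ∈ '-' :: xs') hx
    | cons u us' =>
      simp at h hx hu
      obtain ⟨h1, h2⟩ := ihx hx.2 hu.2 h.2
      exact ⟨by rw [h.1, h1], h2⟩

theorem pvKey_inj {a b c d : Int} (ha : 0 ≤ a) (hb : 0 ≤ b) (hc : 0 ≤ c) (hd : 0 ≤ d)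
    (h : pvKey a b = pvKey c d) : a = c ∧ b = d := by
  unfold pvKey at h
  rw [pv_toChars_nonneg ha, pv_toChars_nonneg hb, pv_toChars_nonneg hc, pv_toChars_nonneg hd] at h
  obtain ⟨h1, h2⟩ := pv_split_dash (pv_dash_not_mem_pvDigits _) (pv_dash_not_mem_pvDigits _) h
  have e1 := pvDigits_inj _ _ h1
  have e2 := pvDigits_inj _ _ h2
  omega

-- ---- proof-side views of the two programs ----

def pvCell (lineList : List (List String)) (r c : Int) : String :=
  PySem.List.pyGetD (PySem.List.pyGetD lineList r []) c ""

def pvDst (m : Int × Int × String) : Int × Int := (m.1, m.2.1)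
def pvKey3 (m : Int × Int × String) : List Char := pvKey m.1 m.2.1

def pvStepA (md : PySem.Dict (List Char) String) (m : Int × Int × String) : PySem.Dict (List Char) String :=
  if md.contains (pvKey3 m) then md.insert (pvKey3 m) "x" else md.insert (pvKey3 m) m.2.2

def deltasB : PySem.Dict String (Int × Int) :=
  PySem.Dict.ofList [(">", (0, 1)), ("<", (0, -1)), ("v", (1, 0)), ("^", (-1, 0))]

def pvMovesB (lineList : List (List String)) (h_ w : Int) : List (Int × Int × String) :=
  (PySem.List.pyRange 0 h_).foldl (fun ms ih =>
    (PySem.List.pyRange 0 w).foldl (fun ms iw =>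
      let c := PySem.List.pyGetD (PySem.List.pyGetD lineList ih []) iw ""
      match deltasB.get? c with
      | some d => ms ++ [(PySem.Int.mod (ih + d.1) h_, PySem.Int.mod (iw + d.2) w, c)]
      | none => ms) ms) []

-- the per-cell contribution of pvMovesB, as one list-valued function
def pvG (lineList : List (List String)) (h_ w ih iw : Int) : List (Int × Int × String) :=
  match deltasB.get? (pvCell lineList ih iw) with
  | some d => [(PySem.Int.mod (ih + d.1) h_, PySem.Int.mod (iw + d.2) w, pvCell lineList ih iw)]
  | none => []

-- ---- generic fold helpers ----

theorem pv_foldl_hom {α σ τ : Type} (hm : τ → σ) (f : σ → α → σ) (g : τ → α → τ)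
    (l : List α) (t : τ)
    (H : ∀ a ∈ l, ∀ t', hm (g t' a) = f (hm t') a) :
    hm (l.foldl g t) = l.foldl f (hm t) := by
  induction l generalizing t with
  | nil => rfl
  | cons x xs ih =>
    simp only [List.foldl_cons]
    rw [ih _ (fun a ha t' => H a (List.mem_cons_of_mem _ ha) t'),
      H x (List.mem_cons_self) t]

theorem pv_foldl_inv {α β : Type} (P : β → Prop) (l : List α) (g : List β → α → List β)
    (H : ∀ a ∈ l, ∀ ms, (∀ m ∈ ms, P m) → ∀ m ∈ g ms a, P m) :
    ∀ ms, (∀ m ∈ ms, P m) → ∀ m ∈ l.foldl g ms, P m := by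
  induction l with
  | nil => intro ms h; exact h
  | cons x xs ih =>
    intro ms h
    exact ih (fun a ha => H a (List.mem_cons_of_mem _ ha)) _ (H x List.mem_cons_self ms h)

theorem pv_countP_or_disjoint {α : Type} (l : List α) (p q r : α → Bool)
    (h1 : ∀ x ∈ l, p x = (q x || r x)) (h2 : ∀ x ∈ l, ¬(q x = true ∧ r x = true)) :
    l.countP p = l.countP q + l.countP r := by
  induction l with
  | nil => simp
  | cons x xs ih =>
    simp only [List.countP_cons]
    rw [ih (fun y hy => h1 y (List.mem_cons_of_mem _ hy)) (fun y hy => h2 y (List.mem_cons_of_mem _ hy))]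
    have e1 := h1 x List.mem_cons_self
    have e2 := h2 x List.mem_cons_self
    cases hq : q x <;> cases hr : r x <;> simp [hq, hr] at e1 e2 ⊢ <;> simp [e1] <;> omega

theorem pv_countP_replace (l : List (List Char × String)) (k : List Char) (v : String)
    (hn : (l.map Prod.fst).Nodup) (hm : (k, v) ∈ l) :
    List.countP (fun q => decide ¬(q.2 = "x")) (l.map fun q => if (q.1 == k) then (k, ("x" : String)) else q)
      + (if v = "x" then 0 else 1)
      = List.countP (fun q => decide ¬(q.2 = "x")) l := by
  induction l with
  | nil => simp at hm
  | cons x xs ih =>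
    simp only [List.map_cons, List.countP_cons]
    rw [List.map_cons, List.nodup_cons] at hn
    by_cases hx : x.1 = k
    · have hknotin : k ∉ xs.map Prod.fst := hx ▸ hn.1
      have hxv : x.2 = v := by
        rcases List.mem_cons.mp hm with h | h
        · rw [← h]
        · exact absurd (List.mem_map.mpr ⟨(k, v), h, rfl⟩) hknotin
      have hmapid : xs.map (fun q => if (q.1 == k) then (k, ("x" : String)) else q) = xs := by
        rw [List.map_congr_left (g := id) ?_, List.map_id]
        intro a ha
        have hne : a.1 ≠ k := fun he => hknotin (he ▸ List.mem_map.mpr ⟨a, ha, rfl⟩)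
        simp [hne]
      rw [hmapid]
      simp only [hx, beq_self_eq_true, if_true]
      rw [← hxv]
      by_cases hv : x.2 = "x" <;> simp [hv]
    · have hm' : (k, v) ∈ xs := by
        rcases List.mem_cons.mp hm with h | h
        · exact absurd (congrArg Prod.fst h.symm) hx
        · exact h
      have hxe : (x.1 == k) = false := beq_false_of_ne hx
      rw [hxe]
      simp only [Bool.false_eq_true, if_false]
      have := ih hn.2 hm'
      omega

-- ---- the per-cell facts ----

theorem pv_wrap (x b : Int) (hb : 0 < b) (h1 : -1 ≤ x) (h2 : x ≤ b) :
    (if (if x ≥ b then (0:Int) else x) < 0 then b - 1 else (if x ≥ b then (0:Int) else x))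
      = PySem.Int.mod x b := by
  rw [PySem.Int.mod_eq_emod_of_pos hb]
  by_cases hxb : x ≥ b
  · have hxb' : x = b := le_antisymm h2 hxb
    have e : (if x ≥ b then (0:Int) else x) = 0 := if_pos hxb
    rw [e, if_neg (lt_irrefl 0), hxb', Int.emod_self]
  · by_cases hx0 : x < 0
    · have hx1 : x = -1 := by omega
      subst hx1
      simp only [hxb, if_false, hx0, if_true]
      have he : (-1 : Int) % b = (b - 1) % b := by
        conv_rhs => rw [show b - 1 = -1 + b * 1 by ring]
        rw [Int.add_mul_emod_self_left]
      rw [he, Int.emod_eq_of_lt (by omega) (by omega)]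
    · simp only [hxb, if_false, hx0]
      rw [Int.emod_eq_of_lt (by omega) (by omega)]

theorem pv_mod_self {x n : Int} (h1 : 0 ≤ x) (h2 : x < n) : PySem.Int.mod x n = x := by
  rw [PySem.Int.mod_eq_emod_of_pos (lt_of_le_of_lt h1 h2), Int.emod_eq_of_lt h1 h2]

theorem pv_mod_shift_up {x c n : Int} (h1 : 0 ≤ x) (h2 : x < n) (h3 : 0 ≤ c) (h4 : c < n) :
    PySem.Int.mod (x + 1) n = c ↔ x = PySem.Int.mod (c - 1) n := by
  have hn : 0 < n := lt_of_le_of_lt h3 h4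
  rw [← pv_wrap (x + 1) n hn (by omega) (by omega), ← pv_wrap (c - 1) n hn (by omega) (by omega)]
  split_ifs <;> omega

theorem pv_mod_shift_down {x c n : Int} (h1 : 0 ≤ x) (h2 : x < n) (h3 : 0 ≤ c) (h4 : c < n) :
    PySem.Int.mod (x - 1) n = c ↔ x = PySem.Int.mod (c + 1) n := by
  have hn : 0 < n := lt_of_le_of_lt h3 h4
  rw [← pv_wrap (x - 1) n hn (by omega) (by omega), ← pv_wrap (c + 1) n hn (by omega) (by omega)]
  split_ifs <;> omega

theorem pv_infix_arrows (l : List Char) (h : l <:+: ['>', '<', 'v', '^']) :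
    l = [] ∨ l = ['>'] ∨ l = ['<'] ∨ l = ['v'] ∨ l = ['^'] ∨ l = ['>','<'] ∨ l = ['<','v'] ∨
    l = ['v','^'] ∨ l = ['>','<','v'] ∨ l = ['<','v','^'] ∨ l = ['>','<','v','^'] := by
  obtain ⟨s, t, hst⟩ := h
  rcases s with _ | ⟨a1, _ | ⟨a2, _ | ⟨a3, _ | ⟨a4, s⟩⟩⟩⟩ <;>
    rcases l with _ | ⟨b1, _ | ⟨b2, _ | ⟨b3, _ | ⟨b4, l⟩⟩⟩⟩ <;>
      simp_all

theorem pv_deltasB_get? (c : String) :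
    deltasB.get? c = if ">" = c then some ((0:Int), (1:Int)) else if "<" = c then some (0, -1)
      else if "v" = c then some (1, 0) else if "^" = c then some (-1, 0) else none := by
  have e : deltasB = PySem.Dict.mk [(">", (0, 1)), ("<", (0, -1)), ("v", (1, 0)), ("^", (-1, 0))] := rfl
  rw [e]
  rw [PySem.Dict.get?_mk_cons, PySem.Dict.get?_mk_cons, PySem.Dict.get?_mk_cons, PySem.Dict.get?_mk_cons]
  have emp : (PySem.Dict.mk ([] : List (String × (Int × Int)))).get? c = none := rfl
  rw [emp]
  simp only [beq_iff_eq]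

theorem pv_isIn_false (c : String) (hbad : c ∉ badCells)
    (h1 : c ≠ ">") (h2 : c ≠ "<") (h3 : c ≠ "v") (h4 : c ≠ "^") :
    PySem.Str.isIn c "><v^" = false := by
  by_contra h
  have h' : PySem.Str.isIn c "><v^" = true := by
    cases hh : PySem.Str.isIn c "><v^"
    · exact absurd hh h
    · rfl
  have hinf := (PySem.Str.isIn_iff_infix c "><v^").mp h'
  have harr := pv_infix_arrows c.toList (by simpa using hinf)
  have hs : ∀ (t : String), c.toList = t.toList → c = t := fun t ht => String.toList_inj.mp ht
  rcases harr with h | h | h | h | h | h | h | h | h | h | h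
  · exact hbad (by rw [hs "" h]; simp [badCells])
  · exact h1 (hs ">" h)
  · exact h2 (hs "<" h)
  · exact h3 (hs "v" h)
  · exact h4 (hs "^" h)
  · exact hbad (by rw [hs "><" h]; simp [badCells])
  · exact hbad (by rw [hs "<v" h]; simp [badCells])
  · exact hbad (by rw [hs "v^" h]; simp [badCells])
  · exact hbad (by rw [hs "><v" h]; simp [badCells])
  · exact hbad (by rw [hs "<v^" h]; simp [badCells])
  · exact hbad (by rw [hs "><v^" h]; simp [badCells])

theorem pv_cell_window (lineList : List (List String)) (h_ w : Int)
    (hpre : Pre_bewegen lineList h_ w) {ih iw : Int}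
    (hih1 : 0 ≤ ih) (hih2 : ih < h_) (hiw1 : 0 ≤ iw) (hiw2 : iw < w) :
    (PySem.List.pyGetD (PySem.List.pyGetD lineList ih []) iw "") ∉ badCells := by
  obtain ⟨hlen, hrow⟩ := hpre
  have hihn : ih.toNat < h_.toNat := by omega
  have hlt : ih.toNat < lineList.length := by omega
  rw [PySem.List.pyGetD_of_nonneg _ _ hih1, List.getD_eq_getElem _ _ hlt]
  have hlt' : ih.toNat < (List.take h_.toNat lineList).length := by
    simp only [List.length_take]; omega
  have hrowmem : lineList[ih.toNat] ∈ lineList.take h_.toNat := by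
    have hmem := List.getElem_mem hlt'
    rwa [List.getElem_take] at hmem
  obtain ⟨hwlen, hcell⟩ := hrow _ hrowmem
  have hiwn : iw.toNat < lineList[ih.toNat].length := by omega
  rw [PySem.List.pyGetD_of_nonneg _ _ hiw1, List.getD_eq_getElem _ _ hiwn]
  apply hcell
  have hlt2 : iw.toNat < (List.take w.toNat lineList[ih.toNat]).length := by
    simp only [List.length_take]; omega
  have hmem := List.getElem_mem hlt2
  rwa [List.getElem_take] at hmem

theorem pv_moveA (lineList : List (List String)) (h_ w ih iw : Int)
    (md : PySem.Dict (List Char) String) (c : String)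
    (hc : PySem.List.pyGetD (PySem.List.pyGetD lineList ih []) iw "" = c) (d1 d2 : Int)
    (hm : (if c = ">" then ((0:Int), (1:Int)) else if c = "<" then (0, -1) else if c = "v" then (1, 0)
        else if c = "^" then (-1, 0) else (0, 0)) = (d1, d2))
    (hb : 0 < h_) (hw : 0 < w) (h1 : -1 ≤ ih + d1) (h2 : ih + d1 ≤ h_)
    (h3 : -1 ≤ iw + d2) (h4 : iw + d2 ≤ w) :
    moveA lineList h_ w ih iw md
      = pvStepA md (PySem.Int.mod (ih + d1) h_, PySem.Int.mod (iw + d2) w, c) := by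
  unfold moveA pvStepA pvKey3
  rw [hc]
  simp only [hm]
  rw [pv_wrap (ih + d1) h_ hb h1 h2, pv_wrap (iw + d2) w hw h3 h4]

theorem pv_cell (lineList : List (List String)) (h_ w ih iw : Int)
    (hpre : Pre_bewegen lineList h_ w) (hih1 : 0 ≤ ih) (hih2 : ih < h_)
    (hiw1 : 0 ≤ iw) (hiw2 : iw < w) (md : PySem.Dict (List Char) String) :
    (if PySem.Str.isIn (PySem.List.pyGetD (PySem.List.pyGetD lineList ih []) iw "") "><v^"
       then moveA lineList h_ w ih iw md else md)
    = (match deltasB.get? (PySem.List.pyGetD (PySem.List.pyGetD lineList ih []) iw "") with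
       | some d => pvStepA md (PySem.Int.mod (ih + d.1) h_, PySem.Int.mod (iw + d.2) w,
           PySem.List.pyGetD (PySem.List.pyGetD lineList ih []) iw "")
       | none => md) := by
  have hb : 0 < h_ := lt_of_le_of_lt hih1 hih2
  have hwp : 0 < w := lt_of_le_of_lt hiw1 hiw2
  have hbad := pv_cell_window lineList h_ w hpre hih1 hih2 hiw1 hiw2
  set c := PySem.List.pyGetD (PySem.List.pyGetD lineList ih []) iw "" with hcdef
  by_cases h1 : c = ">"
  · have hiA : PySem.Str.isIn c "><v^" = true := by rw [h1]; decide
    have hgB : deltasB.get? c = some ((0:Int), (1:Int)) := by rw [h1]; rfl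
    rw [if_pos hiA, hgB]
    exact pv_moveA lineList h_ w ih iw md c hcdef.symm 0 1 (by rw [if_pos h1]) hb hwp
      (by omega) (by omega) (by omega) (by omega)
  · by_cases h2 : c = "<"
    · have hiA : PySem.Str.isIn c "><v^" = true := by rw [h2]; decide
      have hgB : deltasB.get? c = some ((0:Int), (-1:Int)) := by rw [h2]; rfl
      rw [if_pos hiA, hgB]
      exact pv_moveA lineList h_ w ih iw md c hcdef.symm 0 (-1)
        (by rw [if_neg h1, if_pos h2]) hb hwp (by omega) (by omega) (by omega) (by omega)
    · by_cases h3 : c = "v"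
      · have hiA : PySem.Str.isIn c "><v^" = true := by rw [h3]; decide
        have hgB : deltasB.get? c = some ((1:Int), (0:Int)) := by rw [h3]; rfl
        rw [if_pos hiA, hgB]
        exact pv_moveA lineList h_ w ih iw md c hcdef.symm 1 0
          (by rw [if_neg h1, if_neg h2, if_pos h3]) hb hwp (by omega) (by omega) (by omega) (by omega)
      · by_cases h4 : c = "^"
        · have hiA : PySem.Str.isIn c "><v^" = true := by rw [h4]; decide
          have hgB : deltasB.get? c = some ((-1:Int), (0:Int)) := by rw [h4]; rfl
          rw [if_pos hiA, hgB]
          exact pv_moveA lineList h_ w ih iw md c hcdef.symm (-1) 0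
            (by rw [if_neg h1, if_neg h2, if_neg h3, if_pos h4]) hb hwp
            (by omega) (by omega) (by omega) (by omega)
        · have hgB : deltasB.get? c = none := by
            rw [pv_deltasB_get? c, if_neg (fun hh => h1 hh.symm), if_neg (fun hh => h2 hh.symm),
              if_neg (fun hh => h3 hh.symm), if_neg (fun hh => h4 hh.symm)]
          rw [hgB, if_neg ?_]
          rw [pv_isIn_false c hbad h1 h2 h3 h4]
          simp

theorem pv_phase1 (lineList : List (List String)) (h_ w : Int) (hpre : Pre_bewegen lineList h_ w) :
    ((PySem.List.pyRange 0 h_).foldl (fun md ih =>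
      (PySem.List.pyRange 0 w).foldl (fun md iw =>
        if PySem.Str.isIn (PySem.List.pyGetD (PySem.List.pyGetD lineList ih []) iw "") "><v^"
          then moveA lineList h_ w ih iw md else md) md)
      PySem.Dict.empty)
    = (pvMovesB lineList h_ w).foldl pvStepA PySem.Dict.empty := by
  unfold pvMovesB
  refine (pv_foldl_hom (fun ms => ms.foldl pvStepA PySem.Dict.empty) _ _ (PySem.List.pyRange 0 h_) [] ?_).symm
  intro ih hihmem ms
  obtain ⟨hih1, hih2⟩ := PySem.List.mem_pyRange_one.mp hihmem
  refine pv_foldl_hom (fun ms => ms.foldl pvStepA PySem.Dict.empty) _ _ (PySem.List.pyRange 0 w) ms ?_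
  intro iw hiwmem ms'
  obtain ⟨hiw1, hiw2⟩ := PySem.List.mem_pyRange_one.mp hiwmem
  show (fun msx => msx.foldl pvStepA PySem.Dict.empty)
      (match deltasB.get? (PySem.List.pyGetD (PySem.List.pyGetD lineList ih []) iw "") with
       | some d => ms' ++ [(PySem.Int.mod (ih + d.1) h_, PySem.Int.mod (iw + d.2) w,
           PySem.List.pyGetD (PySem.List.pyGetD lineList ih []) iw "")]
       | none => ms') = _
  rw [pv_cell lineList h_ w ih iw hpre hih1 hih2 hiw1 hiw2]
  cases hg : deltasB.get? (PySem.List.pyGetD (PySem.List.pyGetD lineList ih []) iw "") with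
  | none => rfl
  | some d => simp [List.foldl_append]

theorem pv_movesB_mem (lineList : List (List String)) (h_ w : Int) :
    ∀ m ∈ pvMovesB lineList h_ w,
      ((0 ≤ m.1 ∧ m.1 < h_) ∧ (0 ≤ m.2.1 ∧ m.2.1 < w)) ∧ m.2.2 ≠ "x" := by
  unfold pvMovesB
  refine pv_foldl_inv _ _ _ ?_ [] (by simp)
  intro ih hihmem ms hms
  obtain ⟨hih1, hih2⟩ := PySem.List.mem_pyRange_one.mp hihmem
  have hb : 0 < h_ := lt_of_le_of_lt hih1 hih2
  refine pv_foldl_inv _ _ _ ?_ ms hms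
  intro iw hiwmem ms' hms' m hm
  obtain ⟨hiw1, hiw2⟩ := PySem.List.mem_pyRange_one.mp hiwmem
  have hwp : 0 < w := lt_of_le_of_lt hiw1 hiw2
  cases hg : deltasB.get? (PySem.List.pyGetD (PySem.List.pyGetD lineList ih []) iw "") with
  | none =>
    simp only [hg] at hm
    exact hms' m hm
  | some d =>
    simp only [hg] at hm
    rcases List.mem_append.mp hm with hold | hnew
    · exact hms' m hold
    · have hmeq := List.mem_singleton.mp hnew
      subst hmeq
      refine ⟨⟨⟨PySem.Int.mod_nonneg _ hb, PySem.Int.mod_lt _ hb⟩,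
        ⟨PySem.Int.mod_nonneg _ hwp, PySem.Int.mod_lt _ hwp⟩⟩, ?_⟩
      intro hcx
      simp only [] at hcx
      rw [hcx] at hg
      rw [pv_deltasB_get? "x", if_neg (by decide : ¬((">":String) = "x")),
        if_neg (by decide : ¬(("<":String) = "x")), if_neg (by decide : ¬(("v":String) = "x")),
        if_neg (by decide : ¬(("^":String) = "x"))] at hg
      simp at hg

-- ---- the counting core (A's sentinel dict counts destinations hit exactly once) ----

theorem pv_core_aux (L : List (Int × Int × String))
    (hP : ∀ m ∈ L, ((0:Int) ≤ m.1 ∧ (0:Int) ≤ m.2.1) ∧ m.2.2 ≠ "x") :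
    (L.foldl pvStepA PySem.Dict.empty).keys.Nodup ∧
    (∀ d : Int × Int, 0 ≤ d.1 → 0 ≤ d.2 →
      (((L.foldl pvStepA PySem.Dict.empty).get? (pvKey d.1 d.2) = none) ↔ (L.map pvDst).count d = 0) ∧
      (((L.foldl pvStepA PySem.Dict.empty).get? (pvKey d.1 d.2) = some "x") ↔ 2 ≤ (L.map pvDst).count d)) ∧
    List.countP (fun kv => decide ¬(kv.2 = "x")) (L.foldl pvStepA PySem.Dict.empty).items
      = List.countP (fun m => decide ((L.map pvDst).count (pvDst m) = 1)) L := by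
  induction L using List.reverseRecOn with
  | nil =>
    simp only [List.foldl_nil, List.map_nil]
    refine ⟨?_, fun d _ _ => ⟨?_, ?_⟩, ?_⟩
    · rw [PySem.Dict.keys_empty]; exact List.nodup_nil
    · rw [PySem.Dict.get?_empty]; simp
    · rw [PySem.Dict.get?_empty]; simp
    · have e0 : (PySem.Dict.empty : PySem.Dict (List Char) String).items = [] := rfl
      rw [e0]; rfl
  | append_singleton L m ih =>
    have hPL : ∀ m' ∈ L, ((0:Int) ≤ m'.1 ∧ (0:Int) ≤ m'.2.1) ∧ m'.2.2 ≠ "x" :=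
      fun m' hm' => hP m' (List.mem_append_left _ hm')
    obtain ⟨⟨he1, he2⟩, hcx⟩ := hP m (List.mem_append_right _ (List.mem_singleton_self m))
    obtain ⟨hnd, hiff, hcnt⟩ := ih hPL
    rw [List.foldl_append] at *
    simp only [List.foldl_cons, List.foldl_nil] at *
    set D := L.foldl pvStepA PySem.Dict.empty with hDdef
    set e : Int × Int := pvDst m with hedef
    have hee1 : (0:Int) ≤ e.1 := he1
    have hee2 : (0:Int) ≤ e.2 := he2
    have hk3 : pvKey3 m = pvKey e.1 e.2 := rfl
    obtain ⟨hiffn, hiffx⟩ := hiff e hee1 hee2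
    set cnt := (L.map pvDst).count e with hcntdef
    have hcount : ∀ d : Int × Int, ((L ++ [m]).map pvDst).count d
        = (L.map pvDst).count d + (if d = e then 1 else 0) := by
      intro d
      rw [List.map_append, List.count_append]
      simp only [List.map_cons, List.map_nil, List.count_singleton]
      by_cases hde : d = e
      · simp [hde, hedef]
      · have hb0 : (pvDst m == d) = false := by
          rw [beq_eq_false_iff_ne]
          exact fun hc => hde ((hedef.trans hc).symm)
        simp [hb0, hde]
    have hkeyne : ∀ d : Int × Int, 0 ≤ d.1 → 0 ≤ d.2 → d ≠ e → pvKey d.1 d.2 ≠ pvKey e.1 e.2 := by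
      intro d hd1 hd2 hde hk
      obtain ⟨q1, q2⟩ := pvKey_inj hd1 hd2 hee1 hee2 hk
      exact hde (Prod.ext q1 q2)
    rcases Nat.lt_or_ge cnt 1 with hc0 | hc1
    · -- cnt = 0 : fresh destination
      have hc0' : cnt = 0 := by omega
      have hnone : D.get? (pvKey e.1 e.2) = none := hiffn.mpr hc0'
      have hcontains : D.contains (pvKey e.1 e.2) = false :=
        (PySem.Dict.get?_eq_none_iff_contains D _).mp hnone
      have hstep : pvStepA D m = D.insert (pvKey e.1 e.2) m.2.2 := by
        rw [pvStepA, hk3, hcontains]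
        simp
      rw [hstep]
      refine ⟨?_, ?_, ?_⟩
      · rw [PySem.Dict.keys_insert_of_not_contains _ _ hcontains]
        have hkn : pvKey e.1 e.2 ∉ D.keys := fun hmem =>
          by rw [(PySem.Dict.contains_iff_mem_keys D _).mpr hmem] at hcontains; simp at hcontains
        rw [List.nodup_append]
        refine ⟨hnd, List.nodup_singleton _, ?_⟩
        intro a ha b hbmem heq
        rw [List.mem_singleton] at hbmem
        exact hkn (hbmem ▸ heq ▸ ha)
      · intro d hd1 hd2
        by_cases hde : d = e
        · rw [hde, PySem.Dict.get?_insert_self, hcount e, if_pos rfl, ← hcntdef, hc0']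
          constructor
          · constructor
            · intro hx; simp at hx
            · intro hx; omega
          · constructor
            · intro hx
              exact absurd (by injection hx) hcx
            · intro hx; omega
        · rw [PySem.Dict.get?_insert_of_ne _ _ (hkeyne d hd1 hd2 hde), hcount d, if_neg hde]
          simpa using hiff d hd1 hd2
      · rw [PySem.Dict.items_insert_of_not_contains _ _ hcontains, List.countP_append]
        have hone : List.countP (fun kv => decide ¬(kv.2 = "x")) [(pvKey e.1 e.2, m.2.2)] = 1 := by
          simp [hcx]
        rw [hone, List.countP_append]
        have hnew : List.countP (fun m' => decide (((L ++ [m]).map pvDst).count (pvDst m') = 1)) [m] = 1 := by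
          simp only [List.countP_cons, List.countP_nil]
          rw [hcount (pvDst m), ← hedef, if_pos rfl, ← hcntdef, hc0']
          simp
        rw [hnew]
        have hsame : List.countP (fun m' => decide (((L ++ [m]).map pvDst).count (pvDst m') = 1)) L
            = List.countP (fun m' => decide ((L.map pvDst).count (pvDst m') = 1)) L := by
          apply List.countP_congr
          intro m' hm'
          have hne : pvDst m' ≠ e := by
            intro hc
            have : 0 < (L.map pvDst).count e :=
              List.count_pos_iff.mpr (hc ▸ List.mem_map_of_mem hm')
            omega
          rw [hcount (pvDst m'), if_neg hne]
          simp
        rw [hsame, hcnt]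
    · -- destination already present
      have hv : ∃ v, D.get? (pvKey e.1 e.2) = some v := by
        cases hD : D.get? (pvKey e.1 e.2) with
        | none => exact absurd (hiffn.mp hD) (by omega)
        | some v => exact ⟨v, rfl⟩
      obtain ⟨v, hD⟩ := hv
      have hcontains : D.contains (pvKey e.1 e.2) = true := by
        rw [PySem.Dict.contains_eq_isSome_get?, hD]
        rfl
      have hstep : pvStepA D m = D.insert (pvKey e.1 e.2) "x" := by
        rw [pvStepA, hk3, hcontains]
        simp
      rw [hstep]
      have hmemit : (pvKey e.1 e.2, v) ∈ D.items := PySem.Dict.mem_items_of_get?_eq_some D hD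
      have hndfst : (D.items.map Prod.fst).Nodup := hnd
      have hitems := PySem.Dict.items_insert_of_contains D ("x" : String) hcontains
      refine ⟨?_, ?_, ?_⟩
      · rw [PySem.Dict.keys_insert_of_contains _ _ hcontains]
        exact hnd
      · intro d hd1 hd2
        by_cases hde : d = e
        · rw [hde, PySem.Dict.get?_insert_self, hcount e, if_pos rfl, ← hcntdef]
          constructor
          · constructor
            · intro hx; simp at hx
            · intro hx; omega
          · constructor
            · intro _; omega
            · intro _; rfl
        · rw [PySem.Dict.get?_insert_of_ne _ _ (hkeyne d hd1 hd2 hde), hcount d, if_neg hde]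
          simpa using hiff d hd1 hd2
      · rw [hitems]
        have hrep := pv_countP_replace D.items (pvKey e.1 e.2) v hndfst hmemit
        rw [List.countP_append]
        have hnewz : List.countP (fun m' => decide (((L ++ [m]).map pvDst).count (pvDst m') = 1)) [m] = 0 := by
          simp only [List.countP_cons, List.countP_nil]
          rw [hcount (pvDst m), ← hedef, if_pos rfl, ← hcntdef]
          simp
          omega
        rw [hnewz]
        rcases Nat.lt_or_ge cnt 2 with hc1' | hc2
        · -- cnt = 1 : the unique earlier arrow dies
          have hce : cnt = 1 := by omega
          have hvx : v ≠ "x" := by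
            intro hveq
            rw [hveq] at hD
            have := hiffx.mp hD
            omega
          rw [if_neg hvx] at hrep
          have hsplit : List.countP (fun m' => decide ((L.map pvDst).count (pvDst m') = 1)) L
              = List.countP (fun m' => decide (((L ++ [m]).map pvDst).count (pvDst m') = 1)) L
                + List.countP (fun m' => decide (pvDst m' = e)) L := by
            apply pv_countP_or_disjoint
            · intro m' _
              by_cases hde : pvDst m' = e
              · rw [hcount (pvDst m'), if_pos hde, hde, ← hcntdef, hce]
                simp
              · rw [hcount (pvDst m'), if_neg hde]
                simp [hde]
            · intro m' _
              rintro ⟨hq, hr⟩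
              have hde : pvDst m' = e := by simpa using hr
              rw [hcount (pvDst m'), if_pos hde, hde, ← hcntdef, hce] at hq
              simp at hq
          have hcnte : List.countP (fun m' => decide (pvDst m' = e)) L = cnt := by
            rw [hcntdef, List.count_eq_countP, List.countP_map]
            apply List.countP_congr
            intro m' _
            simp only [Function.comp_apply, decide_eq_true_eq, beq_iff_eq]
          omega
        · -- cnt ≥ 2 : already a collision
          have hvx : v = "x" := by
            have hx := hiffx.mpr hc2
            rw [hD] at hx
            injection hx
          rw [if_pos hvx] at hrep
          have hsame : List.countP (fun m' => decide (((L ++ [m]).map pvDst).count (pvDst m') = 1)) L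
              = List.countP (fun m' => decide ((L.map pvDst).count (pvDst m') = 1)) L := by
            apply List.countP_congr
            intro m' _
            by_cases hde : pvDst m' = e
            · rw [hcount (pvDst m'), if_pos hde, hde, ← hcntdef]
              simp
              omega
            · rw [hcount (pvDst m'), if_neg hde]
              simp
          omega

theorem pv_core (L : List (Int × Int × String))
    (hP : ∀ m ∈ L, ((0:Int) ≤ m.1 ∧ (0:Int) ≤ m.2.1) ∧ m.2.2 ≠ "x") :
    List.countP (fun kv => decide ¬(kv.2 = "x")) (L.foldl pvStepA PySem.Dict.empty).items
      = List.countP (fun m => decide ((L.map pvDst).count (pvDst m) = 1)) L :=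
  (pv_core_aux L hP).2.2

-- ---- counting elements that occur exactly once = counting values that occur exactly once ----

theorem pv_count_unique {α : Type} [BEq α] [LawfulBEq α] :
    ∀ (D : List α) (M : List α), D.Nodup → (∀ x ∈ M, x ∈ D) →
      M.countP (fun x => decide (M.count x = 1)) = D.countP (fun d => decide (M.count d = 1)) := by
  intro D
  induction D with
  | nil =>
    intro M _ hsub
    have hM : M = [] := List.eq_nil_iff_forall_not_mem.mpr (fun a ha => by simpa using hsub a ha)
    subst hM; rfl
  | cons d D' ihD =>
    intro M hnd hsub
    rw [List.nodup_cons] at hnd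
    have hsplit := List.countP_eq_countP_filter_add M
      (fun x => decide (M.count x = 1)) (fun x => x == d)
    rw [hsplit]
    rw [List.filter_beq d]
    rw [List.countP_replicate]
    set M₁ := M.filter (fun x => !(x == d)) with hM1def
    have hcnt1 : ∀ x, x ∈ M₁ → M₁.count x = M.count x := by
      intro x hx
      have hxd : (!(x == d)) = true := (List.mem_filter.mp hx).2
      rw [hM1def]
      exact List.count_filter hxd
    have hsub1 : ∀ x ∈ M₁, x ∈ D' := by
      intro x hx
      have hxM : x ∈ M := List.mem_of_mem_filter hx
      have hxd : (!(x == d)) = true := (List.mem_filter.mp hx).2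
      have hxd' : x ≠ d := by simpa using hxd
      rcases List.mem_cons.mp (hsub x hxM) with h | h
      · exact absurd h hxd'
      · exact h
    have hc1 : M₁.countP (fun x => decide (M.count x = 1))
        = M₁.countP (fun x => decide (M₁.count x = 1)) := by
      apply List.countP_congr
      intro x hx
      rw [hcnt1 x hx]
    have hc2 : D'.countP (fun e => decide (M₁.count e = 1))
        = D'.countP (fun e => decide (M.count e = 1)) := by
      apply List.countP_congr
      intro e he
      have hed : e ≠ d := fun hc => hnd.1 (hc ▸ he)
      have : M₁.count e = M.count e := by
        rw [hM1def]
        exact List.count_filter (by simpa using hed)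
      rw [this]
    rw [hc1, ihD M₁ hnd.2 hsub1, hc2, List.countP_cons]
    by_cases hd1 : M.count d = 1
    · simp [hd1]
      omega
    · simp [hd1]

-- ---- sums of pinned indicators ----

theorem pv_sum_pinned {α : Type} [DecidableEq α] (l : List α) (a : α) (v : ℕ) (f : α → ℕ)
    (hnd : l.Nodup) (ha : a ∈ l) (hf : ∀ x ∈ l, f x = if x = a then v else 0) :
    (l.map f).sum = v := by
  induction l with
  | nil => simp at ha
  | cons x xs ih =>
    rw [List.nodup_cons] at hnd
    simp only [List.map_cons, List.sum_cons]
    by_cases hx : x = a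
    · subst hx
      rw [hf x List.mem_cons_self, if_pos rfl]
      have hz : (xs.map f).sum = 0 := by
        apply List.sum_eq_zero
        intro y hy
        obtain ⟨z, hz1, hz2⟩ := List.mem_map.mp hy
        rw [← hz2, hf z (List.mem_cons_of_mem _ hz1),
          if_neg (fun hc => hnd.1 (by rw [← hc]; exact hz1))]
      omega
    · have ha' : a ∈ xs := by
        rcases List.mem_cons.mp ha with h | h
        · exact absurd h.symm hx
        · exact h
      rw [hf x List.mem_cons_self, if_neg hx,
        ih hnd.2 ha' (fun y hy => hf y (List.mem_cons_of_mem _ hy))]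
      omega

-- ---- pvMovesB as a flatMap over the grid ----

theorem pv_movesB_flat (lineList : List (List String)) (h_ w : Int) :
    pvMovesB lineList h_ w
      = (PySem.List.pyRange 0 h_).flatMap (fun ih =>
          (PySem.List.pyRange 0 w).flatMap (fun iw => pvG lineList h_ w ih iw)) := by
  unfold pvMovesB
  have hin : ∀ (ih : Int) (ms : List (Int × Int × String)),
      (PySem.List.pyRange 0 w).foldl (fun ms iw =>
        let c := PySem.List.pyGetD (PySem.List.pyGetD lineList ih []) iw ""
        match deltasB.get? c with
        | some d => ms ++ [(PySem.Int.mod (ih + d.1) h_, PySem.Int.mod (iw + d.2) w, c)]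
        | none => ms) ms
      = ms ++ (PySem.List.pyRange 0 w).flatMap (fun iw => pvG lineList h_ w ih iw) := by
    intro ih ms
    have he : (fun (ms : List (Int × Int × String)) (iw : Int) =>
        let c := PySem.List.pyGetD (PySem.List.pyGetD lineList ih []) iw ""
        match deltasB.get? c with
        | some d => ms ++ [(PySem.Int.mod (ih + d.1) h_, PySem.Int.mod (iw + d.2) w, c)]
        | none => ms)
        = (fun ms iw => ms ++ pvG lineList h_ w ih iw) := by
      funext ms iw
      simp only [pvG, pvCell]
      cases deltasB.get? (PySem.List.pyGetD (PySem.List.pyGetD lineList ih []) iw "") <;> simp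
    rw [he, PySem.List.foldl_append_eq_flatMap]
  have ho : (fun (ms : List (Int × Int × String)) (ih : Int) =>
      (PySem.List.pyRange 0 w).foldl (fun ms iw =>
        let c := PySem.List.pyGetD (PySem.List.pyGetD lineList ih []) iw ""
        match deltasB.get? c with
        | some d => ms ++ [(PySem.Int.mod (ih + d.1) h_, PySem.Int.mod (iw + d.2) w, c)]
        | none => ms) ms)
      = (fun ms ih => ms ++ (PySem.List.pyRange 0 w).flatMap (fun iw => pvG lineList h_ w ih iw)) := by
    funext ms ih
    exact hin ih ms
  rw [ho, PySem.List.foldl_append_eq_flatMap]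
  simp

-- ---- the per-cell destination count ----

theorem pv_t (lineList : List (List String)) (h_ w r c ih iw : Int)
    (hih1 : 0 ≤ ih) (hih2 : ih < h_) (hiw1 : 0 ≤ iw) (hiw2 : iw < w)
    (hr1 : 0 ≤ r) (hr2 : r < h_) (hc1 : 0 ≤ c) (hc2 : c < w) :
    ((pvG lineList h_ w ih iw).map pvDst).count (r, c)
      = ((if ih = r ∧ iw = PySem.Int.mod (c - 1) w ∧ pvCell lineList ih iw = ">" then 1 else 0)
      + (if ih = r ∧ iw = PySem.Int.mod (c + 1) w ∧ pvCell lineList ih iw = "<" then 1 else 0)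
      + (if ih = PySem.Int.mod (r - 1) h_ ∧ iw = c ∧ pvCell lineList ih iw = "v" then 1 else 0)
      + (if ih = PySem.Int.mod (r + 1) h_ ∧ iw = c ∧ pvCell lineList ih iw = "^" then 1 else 0)) := by
  have hh : 0 < h_ := lt_of_le_of_lt hr1 hr2
  have hw : 0 < w := lt_of_le_of_lt hc1 hc2
  set s := pvCell lineList ih iw with hsdef
  by_cases e1 : s = ">"
  · have hget : deltasB.get? s = some ((0:Int), (1:Int)) := by rw [e1]; rfl
    simp only [pvG, ← hsdef, hget, List.map_cons, List.map_nil, pvDst,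
      List.count_cons, List.count_nil, add_zero, beq_iff_eq]
    rw [pv_mod_self hih1 hih2, e1]
    have hiff : ((ih, PySem.Int.mod (iw + 1) w) = ((r : Int), (c : Int)))
        ↔ (ih = r ∧ iw = PySem.Int.mod (c - 1) w ∧ (">":String) = ">") := by
      rw [Prod.mk.injEq]
      constructor
      · rintro ⟨p1, p2⟩
        exact ⟨p1, (pv_mod_shift_up hiw1 hiw2 hc1 hc2).mp p2, rfl⟩
      · rintro ⟨p1, p2, -⟩
        exact ⟨p1, (pv_mod_shift_up hiw1 hiw2 hc1 hc2).mpr p2⟩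
    have d2 : ¬(ih = r ∧ iw = PySem.Int.mod (c + 1) w ∧ (">":String) = "<") :=
      fun hx => absurd hx.2.2 (by decide)
    have d3 : ¬(ih = PySem.Int.mod (r - 1) h_ ∧ iw = c ∧ (">":String) = "v") :=
      fun hx => absurd hx.2.2 (by decide)
    have d4 : ¬(ih = PySem.Int.mod (r + 1) h_ ∧ iw = c ∧ (">":String) = "^") :=
      fun hx => absurd hx.2.2 (by decide)
    rw [if_congr hiff rfl rfl, if_neg d2, if_neg d3, if_neg d4]
    omega
  · by_cases e2 : s = "<"
    · have hget : deltasB.get? s = some ((0:Int), (-1:Int)) := by rw [e2]; rfl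
      simp only [pvG, ← hsdef, hget, List.map_cons, List.map_nil, pvDst,
        List.count_cons, List.count_nil, add_zero, beq_iff_eq]
      rw [pv_mod_self hih1 hih2, e2]
      have hiff : ((ih, PySem.Int.mod (iw + -1) w) = ((r : Int), (c : Int)))
          ↔ (ih = r ∧ iw = PySem.Int.mod (c + 1) w ∧ ("<":String) = "<") := by
        rw [Prod.mk.injEq, show iw + -1 = iw - 1 by ring]
        constructor
        · rintro ⟨p1, p2⟩
          exact ⟨p1, (pv_mod_shift_down hiw1 hiw2 hc1 hc2).mp p2, rfl⟩
        · rintro ⟨p1, p2, -⟩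
          exact ⟨p1, (pv_mod_shift_down hiw1 hiw2 hc1 hc2).mpr p2⟩
      have d1 : ¬(ih = r ∧ iw = PySem.Int.mod (c - 1) w ∧ ("<":String) = ">") :=
        fun hx => absurd hx.2.2 (by decide)
      have d3 : ¬(ih = PySem.Int.mod (r - 1) h_ ∧ iw = c ∧ ("<":String) = "v") :=
        fun hx => absurd hx.2.2 (by decide)
      have d4 : ¬(ih = PySem.Int.mod (r + 1) h_ ∧ iw = c ∧ ("<":String) = "^") :=
        fun hx => absurd hx.2.2 (by decide)
      rw [if_congr hiff rfl rfl, if_neg d1, if_neg d3, if_neg d4]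
      omega
    · by_cases e3 : s = "v"
      · have hget : deltasB.get? s = some ((1:Int), (0:Int)) := by rw [e3]; rfl
        simp only [pvG, ← hsdef, hget, List.map_cons, List.map_nil, pvDst,
          List.count_cons, List.count_nil, add_zero, beq_iff_eq]
        rw [pv_mod_self hiw1 hiw2, e3]
        have hiff : ((PySem.Int.mod (ih + 1) h_, iw) = ((r : Int), (c : Int)))
            ↔ (ih = PySem.Int.mod (r - 1) h_ ∧ iw = c ∧ ("v":String) = "v") := by
          rw [Prod.mk.injEq]
          constructor
          · rintro ⟨p1, p2⟩
            exact ⟨(pv_mod_shift_up hih1 hih2 hr1 hr2).mp p1, p2, rfl⟩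
          · rintro ⟨p1, p2, -⟩
            exact ⟨(pv_mod_shift_up hih1 hih2 hr1 hr2).mpr p1, p2⟩
        have d1 : ¬(ih = r ∧ iw = PySem.Int.mod (c - 1) w ∧ ("v":String) = ">") :=
          fun hx => absurd hx.2.2 (by decide)
        have d2 : ¬(ih = r ∧ iw = PySem.Int.mod (c + 1) w ∧ ("v":String) = "<") :=
          fun hx => absurd hx.2.2 (by decide)
        have d4 : ¬(ih = PySem.Int.mod (r + 1) h_ ∧ iw = c ∧ ("v":String) = "^") :=
          fun hx => absurd hx.2.2 (by decide)
        rw [if_congr hiff rfl rfl, if_neg d1, if_neg d2, if_neg d4]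
        omega
      · by_cases e4 : s = "^"
        · have hget : deltasB.get? s = some ((-1:Int), (0:Int)) := by rw [e4]; rfl
          simp only [pvG, ← hsdef, hget, List.map_cons, List.map_nil, pvDst,
            List.count_cons, List.count_nil, add_zero, beq_iff_eq]
          rw [pv_mod_self hiw1 hiw2, e4]
          have hiff : ((PySem.Int.mod (ih + -1) h_, iw) = ((r : Int), (c : Int)))
              ↔ (ih = PySem.Int.mod (r + 1) h_ ∧ iw = c ∧ ("^":String) = "^") := by
            rw [Prod.mk.injEq, show ih + -1 = ih - 1 by ring]
            constructor
            · rintro ⟨p1, p2⟩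
              exact ⟨(pv_mod_shift_down hih1 hih2 hr1 hr2).mp p1, p2, rfl⟩
            · rintro ⟨p1, p2, -⟩
              exact ⟨(pv_mod_shift_down hih1 hih2 hr1 hr2).mpr p1, p2⟩
          have d1 : ¬(ih = r ∧ iw = PySem.Int.mod (c - 1) w ∧ ("^":String) = ">") :=
            fun hx => absurd hx.2.2 (by decide)
          have d2 : ¬(ih = r ∧ iw = PySem.Int.mod (c + 1) w ∧ ("^":String) = "<") :=
            fun hx => absurd hx.2.2 (by decide)
          have d3 : ¬(ih = PySem.Int.mod (r - 1) h_ ∧ iw = c ∧ ("^":String) = "v") :=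
            fun hx => absurd hx.2.2 (by decide)
          rw [if_congr hiff rfl rfl, if_neg d1, if_neg d2, if_neg d3]
        · have hget : deltasB.get? s = none := by
            rw [pv_deltasB_get? s, if_neg (fun hh => e1 hh.symm), if_neg (fun hh => e2 hh.symm),
              if_neg (fun hh => e3 hh.symm), if_neg (fun hh => e4 hh.symm)]
          simp only [pvG, ← hsdef, hget, List.map_nil, List.count_nil]
          have d1 : ¬(ih = r ∧ iw = PySem.Int.mod (c - 1) w ∧ s = ">") :=
            fun hx => e1 hx.2.2
          have d2 : ¬(ih = r ∧ iw = PySem.Int.mod (c + 1) w ∧ s = "<") :=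
            fun hx => e2 hx.2.2
          have d3 : ¬(ih = PySem.Int.mod (r - 1) h_ ∧ iw = c ∧ s = "v") :=
            fun hx => e3 hx.2.2
          have d4 : ¬(ih = PySem.Int.mod (r + 1) h_ ∧ iw = c ∧ s = "^") :=
            fun hx => e4 hx.2.2
          rw [if_neg d1, if_neg d2, if_neg d3, if_neg d4]

-- ---- the destination-centric count: incoming neighbours ----

theorem pv_count_neigh (lineList : List (List String)) (h_ w r c : Int)
    (hr1 : 0 ≤ r) (hr2 : r < h_) (hc1 : 0 ≤ c) (hc2 : c < w) :
    ((pvMovesB lineList h_ w).map pvDst).count (r, c)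
      = ((if pvCell lineList r (PySem.Int.mod (c - 1) w) = ">" then 1 else 0)
      + (if pvCell lineList r (PySem.Int.mod (c + 1) w) = "<" then 1 else 0)
      + (if pvCell lineList (PySem.Int.mod (r - 1) h_) c = "v" then 1 else 0)
      + (if pvCell lineList (PySem.Int.mod (r + 1) h_) c = "^" then 1 else 0)) := by
  have hh : 0 < h_ := lt_of_le_of_lt hr1 hr2
  have hw : 0 < w := lt_of_le_of_lt hc1 hc2
  rw [pv_movesB_flat]
  simp only [List.map_flatMap]
  rw [List.count_flatMap]
  have hstep : ∀ ih ∈ PySem.List.pyRange 0 h_,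
      (List.count ((r : Int), (c : Int)) ∘ fun ih =>
        (PySem.List.pyRange 0 w).flatMap (fun iw => (pvG lineList h_ w ih iw).map pvDst)) ih
      = (if ih = r ∧ pvCell lineList ih (PySem.Int.mod (c - 1) w) = ">" then 1 else 0)
      + (if ih = r ∧ pvCell lineList ih (PySem.Int.mod (c + 1) w) = "<" then 1 else 0)
      + (if ih = PySem.Int.mod (r - 1) h_ ∧ pvCell lineList ih c = "v" then 1 else 0)
      + (if ih = PySem.Int.mod (r + 1) h_ ∧ pvCell lineList ih c = "^" then 1 else 0) := by
    intro ih hihmem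
    obtain ⟨hih1, hih2⟩ := PySem.List.mem_pyRange_one.mp hihmem
    simp only [Function.comp_apply]
    rw [List.count_flatMap]
    rw [List.map_congr_left (g := fun iw =>
        (if ih = r ∧ iw = PySem.Int.mod (c - 1) w ∧ pvCell lineList ih iw = ">" then 1 else 0)
      + (if ih = r ∧ iw = PySem.Int.mod (c + 1) w ∧ pvCell lineList ih iw = "<" then 1 else 0)
      + (if ih = PySem.Int.mod (r - 1) h_ ∧ iw = c ∧ pvCell lineList ih iw = "v" then 1 else 0)
      + (if ih = PySem.Int.mod (r + 1) h_ ∧ iw = c ∧ pvCell lineList ih iw = "^" then 1 else 0))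
      (fun iw hiwmem => by
        obtain ⟨hiw1, hiw2⟩ := PySem.List.mem_pyRange_one.mp hiwmem
        simp only [Function.comp_apply]
        exact pv_t lineList h_ w r c ih iw hih1 hih2 hiw1 hiw2 hr1 hr2 hc1 hc2)]
    rw [List.sum_map_add, List.sum_map_add, List.sum_map_add]
    rw [pv_sum_pinned (PySem.List.pyRange 0 w) (PySem.Int.mod (c - 1) w)
        (if ih = r ∧ pvCell lineList ih (PySem.Int.mod (c - 1) w) = ">" then 1 else 0) _
        (PySem.List.nodup_pyRange_one 0 w)
        (PySem.List.mem_pyRange_one.mpr ⟨PySem.Int.mod_nonneg _ hw, PySem.Int.mod_lt _ hw⟩)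
        (fun iw _ => by
          by_cases hiw : iw = PySem.Int.mod (c - 1) w
          · subst hiw; simp
          · simp [hiw])]
    rw [pv_sum_pinned (PySem.List.pyRange 0 w) (PySem.Int.mod (c + 1) w)
        (if ih = r ∧ pvCell lineList ih (PySem.Int.mod (c + 1) w) = "<" then 1 else 0) _
        (PySem.List.nodup_pyRange_one 0 w)
        (PySem.List.mem_pyRange_one.mpr ⟨PySem.Int.mod_nonneg _ hw, PySem.Int.mod_lt _ hw⟩)
        (fun iw _ => by
          by_cases hiw : iw = PySem.Int.mod (c + 1) w
          · subst hiw; simp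
          · simp [hiw])]
    rw [pv_sum_pinned (PySem.List.pyRange 0 w) c
        (if ih = PySem.Int.mod (r - 1) h_ ∧ pvCell lineList ih c = "v" then 1 else 0) _
        (PySem.List.nodup_pyRange_one 0 w)
        (PySem.List.mem_pyRange_one.mpr ⟨hc1, hc2⟩)
        (fun iw _ => by
          by_cases hiw : iw = c
          · subst hiw; simp
          · simp [hiw])]
    rw [pv_sum_pinned (PySem.List.pyRange 0 w) c
        (if ih = PySem.Int.mod (r + 1) h_ ∧ pvCell lineList ih c = "^" then 1 else 0) _
        (PySem.List.nodup_pyRange_one 0 w)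
        (PySem.List.mem_pyRange_one.mpr ⟨hc1, hc2⟩)
        (fun iw _ => by
          by_cases hiw : iw = c
          · subst hiw; simp
          · simp [hiw])]
  rw [List.map_congr_left hstep]
  rw [List.sum_map_add, List.sum_map_add, List.sum_map_add]
  rw [pv_sum_pinned (PySem.List.pyRange 0 h_) r
      (if pvCell lineList r (PySem.Int.mod (c - 1) w) = ">" then 1 else 0) _
      (PySem.List.nodup_pyRange_one 0 h_)
      (PySem.List.mem_pyRange_one.mpr ⟨hr1, hr2⟩)
      (fun ih _ => by
        by_cases hih : ih = r
        · subst hih; simp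
        · simp [hih])]
  rw [pv_sum_pinned (PySem.List.pyRange 0 h_) r
      (if pvCell lineList r (PySem.Int.mod (c + 1) w) = "<" then 1 else 0) _
      (PySem.List.nodup_pyRange_one 0 h_)
      (PySem.List.mem_pyRange_one.mpr ⟨hr1, hr2⟩)
      (fun ih _ => by
        by_cases hih : ih = r
        · subst hih; simp
        · simp [hih])]
  rw [pv_sum_pinned (PySem.List.pyRange 0 h_) (PySem.Int.mod (r - 1) h_)
      (if pvCell lineList (PySem.Int.mod (r - 1) h_) c = "v" then 1 else 0) _
      (PySem.List.nodup_pyRange_one 0 h_)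
      (PySem.List.mem_pyRange_one.mpr ⟨PySem.Int.mod_nonneg _ hh, PySem.Int.mod_lt _ hh⟩)
      (fun ih _ => by
        by_cases hih : ih = PySem.Int.mod (r - 1) h_
        · subst hih; simp
        · simp [hih])]
  rw [pv_sum_pinned (PySem.List.pyRange 0 h_) (PySem.Int.mod (r + 1) h_)
      (if pvCell lineList (PySem.Int.mod (r + 1) h_) c = "^" then 1 else 0) _
      (PySem.List.nodup_pyRange_one 0 h_)
      (PySem.List.mem_pyRange_one.mpr ⟨PySem.Int.mod_nonneg _ hh, PySem.Int.mod_lt _ hh⟩)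
      (fun ih _ => by
        by_cases hih : ih = PySem.Int.mod (r + 1) h_
        · subst hih; simp
        · simp [hih])]

-- B's let-chain for one destination cell, named for the proof
def pvInc (lineList : List (List String)) (h_ w r c : Int) : Int :=
  let incoming : Int := 0
  let incoming := if PySem.List.pyGetD (PySem.List.pyGetD lineList r []) (PySem.Int.mod (c - 1) w) "" = ">" then incoming + 1 else incoming
  let incoming := if PySem.List.pyGetD (PySem.List.pyGetD lineList r []) (PySem.Int.mod (c + 1) w) "" = "<" then incoming + 1 else incoming
  let incoming := if PySem.List.pyGetD (PySem.List.pyGetD lineList (PySem.Int.mod (r - 1) h_) []) c "" = "v" then incoming + 1 else incoming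
  let incoming := if PySem.List.pyGetD (PySem.List.pyGetD lineList (PySem.Int.mod (r + 1) h_) []) c "" = "^" then incoming + 1 else incoming
  incoming

theorem pv_inc_eq (lineList : List (List String)) (h_ w r c : Int) :
    pvInc lineList h_ w r c
      = (((if pvCell lineList r (PySem.Int.mod (c - 1) w) = ">" then 1 else 0)
      + (if pvCell lineList r (PySem.Int.mod (c + 1) w) = "<" then 1 else 0)
      + (if pvCell lineList (PySem.Int.mod (r - 1) h_) c = "v" then 1 else 0)
      + (if pvCell lineList (PySem.Int.mod (r + 1) h_) c = "^" then 1 else 0) : ℕ) : Int) := by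
  simp only [pvInc, pvCell]
  split_ifs <;> push_cast

-- ---- countP over a product list, row by row ----

theorem pv_countP_product {α β : Type} (R : List α) (C : List β) (q : α × β → Bool) :
    (R ×ˢ C).countP q = (R.map (fun r => C.countP (fun c => q (r, c)))).sum := by
  induction R with
  | nil => simp [List.nil_product]
  | cons a R' ih =>
    rw [show (a :: R') ×ˢ C = C.map (fun c => (a, c)) ++ R' ×ˢ C from by
      simp [SProd.sprod, List.product]]
    rw [List.countP_append, List.countP_map, ih]
    rfl

-- ===== VERDICT (by name: the statement is the Claim_ definition above) =====
theorem bewegen_spec : Claim_equal_bewegen := by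
  intro lineList h_ w _ hpre
  unfold Spec_bewegen
  have hmemB := pv_movesB_mem lineList h_ w
  have hA : bewegen lineList h_ w
      = ((List.countP (fun kv => decide ¬(kv.2 = "x"))
          ((pvMovesB lineList h_ w).foldl pvStepA PySem.Dict.empty).items : ℕ) : Int) := by
    simp only [bewegen]
    rw [pv_phase1 lineList h_ w hpre]
    rw [PySem.List.foldl_ite_add_one (fun (mf : List Char × String) => ¬ (mf.2 = "x"))]
    simp
  have hcore := pv_core (pvMovesB lineList h_ w)
      (fun m hm => ⟨⟨(hmemB m hm).1.1.1, (hmemB m hm).1.2.1⟩, (hmemB m hm).2⟩)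
  have h1 : List.countP (fun m => decide (((pvMovesB lineList h_ w).map pvDst).count (pvDst m) = 1))
        (pvMovesB lineList h_ w)
      = List.countP (fun x => decide (((pvMovesB lineList h_ w).map pvDst).count x = 1))
        ((pvMovesB lineList h_ w).map pvDst) := by
    rw [List.countP_map]
    rfl
  have hnodup : ((PySem.List.pyRange 0 h_) ×ˢ (PySem.List.pyRange 0 w)).Nodup :=
    List.Nodup.product (PySem.List.nodup_pyRange_one 0 h_) (PySem.List.nodup_pyRange_one 0 w)
  have hsub : ∀ x ∈ (pvMovesB lineList h_ w).map pvDst,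
      x ∈ (PySem.List.pyRange 0 h_) ×ˢ (PySem.List.pyRange 0 w) := by
    intro x hx
    obtain ⟨m, hm, rfl⟩ := List.mem_map.mp hx
    have hb := hmemB m hm
    exact List.mem_product.mpr
      ⟨PySem.List.mem_pyRange_one.mpr ⟨hb.1.1.1, hb.1.1.2⟩,
       PySem.List.mem_pyRange_one.mpr ⟨hb.1.2.1, hb.1.2.2⟩⟩
  have h2 := pv_count_unique ((PySem.List.pyRange 0 h_) ×ˢ (PySem.List.pyRange 0 w))
      ((pvMovesB lineList h_ w).map pvDst) hnodup hsub
  have h3 := pv_countP_product (PySem.List.pyRange 0 h_) (PySem.List.pyRange 0 w)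
      (fun d => decide (((pvMovesB lineList h_ w).map pvDst).count d = 1))
  have h4 : ∀ r' ∈ PySem.List.pyRange 0 h_,
      List.countP (fun c' => decide (((pvMovesB lineList h_ w).map pvDst).count (r', c') = 1))
        (PySem.List.pyRange 0 w)
      = List.countP (fun c' => decide (pvInc lineList h_ w r' c' = 1)) (PySem.List.pyRange 0 w) := by
    intro r' hr'
    obtain ⟨hr1, hr2⟩ := PySem.List.mem_pyRange_one.mp hr'
    apply List.countP_congr
    intro c' hc'
    obtain ⟨hc1, hc2⟩ := PySem.List.mem_pyRange_one.mp hc'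
    have hcnt : pvInc lineList h_ w r' c'
        = ((((pvMovesB lineList h_ w).map pvDst).count (r', c') : ℕ) : Int) := by
      rw [pv_inc_eq, pv_count_neigh lineList h_ w r' c' hr1 hr2 hc1 hc2]
    simp only [decide_eq_true_eq]
    rw [hcnt]
    omega
  have hB : bewegen_alt lineList h_ w
      = (0:Int) + ((PySem.List.pyRange 0 h_).map (fun r' =>
          ((List.countP (fun c' => decide (pvInc lineList h_ w r' c' = 1))
            (PySem.List.pyRange 0 w) : ℕ) : Int))).sum := by
    show (PySem.List.pyRange 0 h_).foldl (fun anzahl r' =>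
        (PySem.List.pyRange 0 w).foldl (fun anzahl c' =>
          if pvInc lineList h_ w r' c' = 1 then anzahl + 1 else anzahl) anzahl) 0 = _
    have he : (fun (anzahl : Int) (r' : Int) =>
        (PySem.List.pyRange 0 w).foldl (fun anzahl c' =>
          if pvInc lineList h_ w r' c' = 1 then anzahl + 1 else anzahl) anzahl)
        = fun anzahl r' => anzahl + ((List.countP (fun c' => decide (pvInc lineList h_ w r' c' = 1))
            (PySem.List.pyRange 0 w) : ℕ) : Int) := by
      funext anzahl r'
      rw [PySem.List.foldl_ite_add_one (fun c' => pvInc lineList h_ w r' c' = 1)]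
    rw [he, PySem.List.foldl_add]
  rw [hA, hcore, h1, h2, h3, hB]
  rw [Nat.cast_list_sum, List.map_map, zero_add]
  apply congrArg List.sum
  apply List.map_congr_left
  intro r' hr'
  simp only [Function.comp_apply]
  exact congrArg Nat.cast (h4 r' hr')
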